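-- pv_equiv track=rewrite | github.com/lupine288-wq/TuscanE | PairwiseCodes/orderpairwise.py | build_short_names
-- ===== SOURCE A (Python) =====
-- from typing import Tuple, List, Dict
--
-- def split_class_and_method(test_name: str) -> Tuple[str, str]:
--     if '#' in test_name:
--         class_part, method_part = test_name.rsplit('#', 1)
--         return class_part, method_part
--     if '.' in test_name:
--         class_part, method_part = test_name.rsplit('.', 1)
--         return class_part, method_part
--     return test_name, 'test'
--
-- def class_token_from_index(i: int) -> str:
--     if i < 1:
--         i = 1
--     repeats = (i - 1) // 26 + 1
--     letter_index = (i - 1) % 26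
--     letter = chr(ord('A') + letter_index)
--     return letter * repeats
--
-- def build_short_names(originals: List[str]) -> Tuple[List[str], Dict[str, str], Dict[str, Tuple[int, str]]]:
--     # First pass: identify class names and assign class indices/tokens
--     class_order = []
--     class_seen = set()
--     class_info: Dict[str, Tuple[int, str]] = {}
--     for name in originals:
--         cls, _ = split_class_and_method(name)
--         if cls not in class_seen:
--             class_seen.add(cls)
--             class_order.append(cls)
--             idx = len(class_order) # 1-based
--             class_info[cls] = (idx, class_token_from_index(idx))
--
--     # Second pass: per-class method counters and build short names
--     per_class_count: Dict[str, int] = {cls: 0 for cls in class_order}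
--     mapping: Dict[str, str] = {}
--     short_list: List[str] = []
--
--     for name in originals:
--         cls, _ = split_class_and_method(name)
--         per_class_count[cls] += 1
--         method_idx = per_class_count[cls]
--         cls_idx, cls_token = class_info[cls]
--         short = f"{cls_token}.{method_idx}"
--         mapping[name] = short
--         short_list.append(short)
--
--     return short_list, mapping, class_info
-- ===== SOURCE B (Python) =====
-- from typing import Tuple, List, Dict
--
-- def split_class_and_method(test_name: str) -> Tuple[str, str]:
--     if '#' in test_name:
--         class_part, method_part = test_name.rsplit('#', 1)
--         return class_part, method_part
--     if '.' in test_name: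
--         class_part, method_part = test_name.rsplit('.', 1)
--         return class_part, method_part
--     return test_name, 'test'
--
-- def class_token_from_index(i: int) -> str:
--     if i < 1:
--         i = 1
--     repeats = (i - 1) // 26 + 1
--     letter_index = (i - 1) % 26
--     letter = chr(ord('A') + letter_index)
--     return letter * repeats
--
-- def build_short_names(originals: List[str]) -> Tuple[List[str], Dict[str, str], Dict[str, Tuple[int, str]]]:
--     # Single pass: discover classes and count their methods as we go.
--     class_info: Dict[str, Tuple[int, str]] = {}
--     per_class_count: Dict[str, int] = {}
--     mapping: Dict[str, str] = {}
--     short_list: List[str] = []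
--     for name in originals:
--         cls, _ = split_class_and_method(name)
--         if cls not in class_info:
--             idx = len(class_info) + 1
--             class_info[cls] = (idx, class_token_from_index(idx))
--         method_idx = per_class_count.get(cls, 0) + 1
--         per_class_count[cls] = method_idx
--         short = f"{class_info[cls][1]}.{method_idx}"
--         mapping[name] = short
--         short_list.append(short)
--     return short_list, mapping, class_info
-- ===== Notes on version B (the rewrite author's own statement) =====
-- stated objective: simpler
-- what changed: A's two sequential scans (first discover classes and assign tokens, then a separate counting scan that needs a pre-initialised zero counter dict and the class_order list) are fused into one single pass that assigns a class its index on first sight (len(class_info)+1) and bumps a lazily-created per-class counter inline; class_order and class_seen disappear entirely.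
import Mathlib
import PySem

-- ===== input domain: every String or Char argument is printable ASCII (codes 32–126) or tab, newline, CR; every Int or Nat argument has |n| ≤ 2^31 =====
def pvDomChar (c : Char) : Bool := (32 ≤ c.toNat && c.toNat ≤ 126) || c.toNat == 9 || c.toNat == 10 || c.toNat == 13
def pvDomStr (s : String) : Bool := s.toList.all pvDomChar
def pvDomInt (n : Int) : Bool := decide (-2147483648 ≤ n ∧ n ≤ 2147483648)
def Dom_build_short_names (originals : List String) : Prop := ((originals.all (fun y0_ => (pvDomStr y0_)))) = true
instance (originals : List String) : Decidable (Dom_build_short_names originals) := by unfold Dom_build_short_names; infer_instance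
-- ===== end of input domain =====

-- B fuses A's two scans (class discovery, then method counting) into a single pass with lazily created counters; same return value.


-- ===== PORT A =====
-- module helper split_class_and_method; rsplit(sep, 1) with a 1-char sep = cut at the LAST occurrence (exact)
def pvSplitCM (s : String) : String × String :=
  let cs := s.toList
  if PySem.Chars.isIn ['#'] cs then
    let i := (PySem.Chars.rfind cs ['#']).toNat
    (String.ofList (cs.take i), String.ofList (cs.drop (i + 1)))
  else if PySem.Chars.isIn ['.'] cs then
    let i := (PySem.Chars.rfind cs ['.']).toNat
    (String.ofList (cs.take i), String.ofList (cs.drop (i + 1)))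
  else (s, "test")

-- module helper class_token_from_index
def pvToken (i : Int) : String :=
  let i' := if i < 1 then 1 else i
  let repeats := PySem.Int.floordiv (i' - 1) 26 + 1
  let letterIndex := PySem.Int.mod (i' - 1) 26
  String.ofList (List.replicate repeats.toNat (Char.ofNat (65 + letterIndex.toNat)))

-- f"{tok}.{m}"
def pvShort (tok : String) (m : Int) : String :=
  String.ofList (tok.toList ++ '.' :: PySem.Int.toChars m)

-- A, first pass body: state (class_order, class_seen, class_info)
def pvStepP1 (st : List String × PySem.Set String × PySem.Dict String (Int × String)) (name : String) :
    List String × PySem.Set String × PySem.Dict String (Int × String) :=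
  let cls := (pvSplitCM name).1
  if st.2.1.contains cls then st
  else
    let order' := st.1 ++ [cls]
    (order', st.2.1.add cls,
      st.2.2.insert cls ((order'.length : Int), pvToken (order'.length : Int)))

-- A, second pass body: state (per_class_count, mapping, short_list); both dict lookups
-- are ported with getD, exact here because pass 1 put every class in both dicts.
def pvStepA2 (info : PySem.Dict String (Int × String))
    (st : PySem.Dict String Int × PySem.Dict String String × List String) (name : String) :
    PySem.Dict String Int × PySem.Dict String String × List String :=
  let cls := (pvSplitCM name).1
  let cnt := st.1.insert cls (st.1.getD cls 0 + 1)
  let m := cnt.getD cls 0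
  let pr := info.getD cls (0, "")
  let short := pvShort pr.2 m
  (cnt, st.2.1.insert name short, st.2.2 ++ [short])

def build_short_names (originals : List String) :
    List String × (List (String × String)) × (List (String × Int × String)) :=
  let p1 := originals.foldl pvStepP1 ([], PySem.Set.ofList [], PySem.Dict.empty)
  let cnt0 := p1.1.foldl (fun d c => d.insert c (0 : Int)) PySem.Dict.empty
  let fin := originals.foldl (pvStepA2 p1.2.2) (cnt0, PySem.Dict.empty, [])
  (fin.2.2, fin.2.1.items, p1.2.2.items)

-- ===== PORT B =====
-- single pass: state (class_info, per_class_count, mapping, short_list)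
def pvStepB
    (st : PySem.Dict String (Int × String) × PySem.Dict String Int × PySem.Dict String String × List String)
    (name : String) :
    PySem.Dict String (Int × String) × PySem.Dict String Int × PySem.Dict String String × List String :=
  let cls := (pvSplitCM name).1
  let info := if st.1.contains cls then st.1
              else st.1.insert cls ((st.1.size : Int) + 1, pvToken ((st.1.size : Int) + 1))
  let m := st.2.1.getD cls 0 + 1
  let short := pvShort (info.getD cls (0, "")).2 m
  (info, st.2.1.insert cls m, st.2.2.1.insert name short, st.2.2.2 ++ [short])

def build_short_names_alt (originals : List String) :
    List String × (List (String × String)) × (List (String × Int × String)) :=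
  let fin := originals.foldl pvStepB (PySem.Dict.empty, PySem.Dict.empty, PySem.Dict.empty, [])
  (fin.2.2.2, fin.2.2.1.items, fin.1.items)

-- ===== PRECONDITION & SPEC =====
def Spec_build_short_names (originals : List String) (out : List String × (List (String × String)) × (List (String × Int × String))) : Prop := out = build_short_names_alt originals
instance (originals : List String) (out : List String × (List (String × String)) × (List (String × Int × String))) : Decidable (Spec_build_short_names originals out) := by unfold Spec_build_short_names; infer_instance

-- ===== CLAIM (what is proved, stated in full; the proofs are below) =====
def Claim_equal_build_short_names : Prop := ∀ (originals : List String), Dom_build_short_names originals → Spec_build_short_names originals (build_short_names originals)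

-- ===== LEMMAS AND PROOFS =====

-- invariant of A's first-pass state: class_seen = keys of class_info, |class_order| = |class_info|
def pvInvP (st : List String × PySem.Set String × PySem.Dict String (Int × String)) : Prop :=
  (∀ j, j ∈ st.2.1 ↔ st.2.2.contains j = true) ∧ st.1.length = st.2.2.size

lemma pvStepP1_pos (st : List String × PySem.Set String × PySem.Dict String (Int × String))
    (name : String) (hc : (pvSplitCM name).1 ∈ st.2.1) : pvStepP1 st name = st := by
  simp [pvStepP1, hc]

lemma pvStepP1_neg (st : List String × PySem.Set String × PySem.Dict String (Int × String))
    (name : String) (hc : (pvSplitCM name).1 ∉ st.2.1) :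
    pvStepP1 st name = (st.1 ++ [(pvSplitCM name).1], st.2.1.add ((pvSplitCM name).1),
      st.2.2.insert ((pvSplitCM name).1)
        ((((st.1 ++ [(pvSplitCM name).1]).length : Nat) : Int),
          pvToken (((st.1 ++ [(pvSplitCM name).1]).length : Nat) : Int))) := by
  simp [pvStepP1, hc]

lemma pvStepP1_inv (st : List String × PySem.Set String × PySem.Dict String (Int × String))
    (name : String) (h : pvInvP st) : pvInvP (pvStepP1 st name) := by
  by_cases hc : (pvSplitCM name).1 ∈ st.2.1
  · rw [pvStepP1_pos st name hc]; exact h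
  · rw [pvStepP1_neg st name hc]
    have hic : st.2.2.contains ((pvSplitCM name).1) = false := by
      cases h' : st.2.2.contains ((pvSplitCM name).1)
      · rfl
      · exact absurd ((h.1 _).mpr h') hc
    constructor
    · intro j
      rw [show ((st.1 ++ [(pvSplitCM name).1], st.2.1.add ((pvSplitCM name).1),
          st.2.2.insert ((pvSplitCM name).1) _) :
          List String × PySem.Set String × PySem.Dict String (Int × String)).2.1
          = st.2.1.add ((pvSplitCM name).1) from rfl]
      rw [PySem.Set.mem_add]
      simp only [PySem.Dict.contains_insert, Bool.or_eq_true, beq_iff_eq]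
      by_cases hj : j = (pvSplitCM name).1
      · simp [hj]
      · simp [hj, h.1 j]
    · simp [PySem.Dict.size_insert, hic, h.2]

lemma pvP1_getD_mono (ys : List String) :
    ∀ (st : List String × PySem.Set String × PySem.Dict String (Int × String))
      (k : String) (d : Int × String), pvInvP st → st.2.2.contains k = true →
      (ys.foldl pvStepP1 st).2.2.getD k d = st.2.2.getD k d := by
  induction ys with
  | nil => intro st k d _ _; rfl
  | cons name t ih =>
    intro st k d hinv hk
    simp only [List.foldl_cons]
    by_cases hc : (pvSplitCM name).1 ∈ st.2.1
    · rw [pvStepP1_pos st name hc]; exact ih st k d hinv hk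
    · have hinv' := pvStepP1_inv st name hinv
      rw [pvStepP1_neg st name hc] at hinv'
      have hne : k ≠ (pvSplitCM name).1 := by
        intro he
        exact hc ((hinv.1 _).mpr (he ▸ hk))
      rw [pvStepP1_neg st name hc]
      rw [ih _ k d hinv' (by simp [PySem.Dict.contains_insert, hk])]
      exact PySem.Dict.getD_insert_of_ne _ _ _ hne

lemma pvCnt0_getD (order : List String) :
    ∀ (d : PySem.Dict String Int), (∀ k, d.getD k 0 = 0) →
      ∀ k, (order.foldl (fun d c => d.insert c (0 : Int)) d).getD k 0 = 0 := by
  induction order with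
  | nil => intro d hd k; exact hd k
  | cons c t ih =>
    intro d hd k
    simp only [List.foldl_cons]
    apply ih
    intro j
    rw [PySem.Dict.getD_insert]
    split_ifs
    · rfl
    · exact hd j

lemma pvStepA2_eq (info : PySem.Dict String (Int × String)) (c : PySem.Dict String Int)
    (mp : PySem.Dict String String) (sl : List String) (name : String) :
    pvStepA2 info (c, mp, sl) name =
      (c.insert ((pvSplitCM name).1) (c.getD ((pvSplitCM name).1) 0 + 1),
       mp.insert name (pvShort (info.getD ((pvSplitCM name).1) (0, "")).2
         (c.getD ((pvSplitCM name).1) 0 + 1)),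
       sl ++ [pvShort (info.getD ((pvSplitCM name).1) (0, "")).2
         (c.getD ((pvSplitCM name).1) 0 + 1)]) := by
  simp [pvStepA2, PySem.Dict.getD_insert_self]

lemma pvStepB_pos (i : PySem.Dict String (Int × String)) (c : PySem.Dict String Int)
    (mp : PySem.Dict String String) (sl : List String) (name : String)
    (h : i.contains ((pvSplitCM name).1) = true) :
    pvStepB (i, c, mp, sl) name =
      (i, c.insert ((pvSplitCM name).1) (c.getD ((pvSplitCM name).1) 0 + 1),
       mp.insert name (pvShort (i.getD ((pvSplitCM name).1) (0, "")).2
         (c.getD ((pvSplitCM name).1) 0 + 1)),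
       sl ++ [pvShort (i.getD ((pvSplitCM name).1) (0, "")).2
         (c.getD ((pvSplitCM name).1) 0 + 1)]) := by
  simp [pvStepB, h]

lemma pvStepB_neg (i : PySem.Dict String (Int × String)) (c : PySem.Dict String Int)
    (mp : PySem.Dict String String) (sl : List String) (name : String)
    (h : i.contains ((pvSplitCM name).1) = false) :
    pvStepB (i, c, mp, sl) name =
      (i.insert ((pvSplitCM name).1) ((i.size : Int) + 1, pvToken ((i.size : Int) + 1)),
       c.insert ((pvSplitCM name).1) (c.getD ((pvSplitCM name).1) 0 + 1),
       mp.insert name (pvShort (pvToken ((i.size : Int) + 1))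
         (c.getD ((pvSplitCM name).1) 0 + 1)),
       sl ++ [pvShort (pvToken ((i.size : Int) + 1))
         (c.getD ((pvSplitCM name).1) 0 + 1)]) := by
  simp [pvStepB, h, PySem.Dict.getD_insert_self]

lemma pvMain (ys : List String) :
    ∀ (st : List String × PySem.Set String × PySem.Dict String (Int × String))
      (cntA cntB : PySem.Dict String Int) (mp : PySem.Dict String String) (sl : List String),
      pvInvP st → (∀ k, cntA.getD k 0 = cntB.getD k 0) →
      (ys.foldl (pvStepA2 ((ys.foldl pvStepP1 st).2.2)) (cntA, mp, sl)).2.1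
          = (ys.foldl pvStepB (st.2.2, cntB, mp, sl)).2.2.1
      ∧ (ys.foldl (pvStepA2 ((ys.foldl pvStepP1 st).2.2)) (cntA, mp, sl)).2.2
          = (ys.foldl pvStepB (st.2.2, cntB, mp, sl)).2.2.2
      ∧ (ys.foldl pvStepB (st.2.2, cntB, mp, sl)).1 = (ys.foldl pvStepP1 st).2.2 := by
  induction ys with
  | nil => intro st cntA cntB mp sl _ _; exact ⟨rfl, rfl, rfl⟩
  | cons name t ih =>
    intro st cntA cntB mp sl hinv hcnt
    by_cases hc : (pvSplitCM name).1 ∈ st.2.1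
    · have hic : st.2.2.contains ((pvSplitCM name).1) = true := (hinv.1 _).mp hc
      simp only [List.foldl_cons, pvStepP1_pos st name hc, pvStepA2_eq,
        pvStepB_pos st.2.2 cntB mp sl name hic]
      have hFg : (t.foldl pvStepP1 st).2.2.getD ((pvSplitCM name).1) (0, "")
          = st.2.2.getD ((pvSplitCM name).1) (0, "") :=
        pvP1_getD_mono t st _ _ hinv hic
      rw [hFg, hcnt ((pvSplitCM name).1)]
      exact ih st _ _ _ _ hinv (by
        intro k
        rw [PySem.Dict.getD_insert, PySem.Dict.getD_insert]
        split_ifs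
        · rfl
        · exact hcnt k)
    · have hic : st.2.2.contains ((pvSplitCM name).1) = false := by
        cases h' : st.2.2.contains ((pvSplitCM name).1)
        · rfl
        · exact absurd ((hinv.1 _).mpr h') hc
      have hinv' := pvStepP1_inv st name hinv
      rw [pvStepP1_neg st name hc] at hinv'
      have hL : (((st.1 ++ [(pvSplitCM name).1]).length : Nat) : Int) = (st.2.2.size : Int) + 1 := by
        simp [hinv.2]
      simp only [List.foldl_cons, pvStepP1_neg st name hc, pvStepA2_eq,
        pvStepB_neg st.2.2 cntB mp sl name hic]
      have hF : (t.foldl pvStepP1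
            (st.1 ++ [(pvSplitCM name).1], st.2.1.add ((pvSplitCM name).1),
              st.2.2.insert ((pvSplitCM name).1)
                ((((st.1 ++ [(pvSplitCM name).1]).length : Nat) : Int),
                  pvToken (((st.1 ++ [(pvSplitCM name).1]).length : Nat) : Int)))).2.2.getD
            ((pvSplitCM name).1) (0, "")
          = ((((st.1 ++ [(pvSplitCM name).1]).length : Nat) : Int),
              pvToken (((st.1 ++ [(pvSplitCM name).1]).length : Nat) : Int)) := by
        rw [pvP1_getD_mono t _ _ _ hinv' (by simp)]
        exact PySem.Dict.getD_insert_self _ _ _ _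
      rw [hF, hcnt ((pvSplitCM name).1), ← hL]
      exact ih _ _ _ _ _ hinv' (by
        intro k
        rw [PySem.Dict.getD_insert, PySem.Dict.getD_insert]
        split_ifs
        · rfl
        · exact hcnt k)

-- ===== VERDICT (by name: the statement is the Claim_ definition above) =====
theorem build_short_names_spec : Claim_equal_build_short_names := by
  intro originals _
  unfold Spec_build_short_names
  have hinv : pvInvP ([], PySem.Set.ofList [], PySem.Dict.empty) := by
    constructor
    · intro j
      simp [PySem.Dict.contains_empty]
    · simp [PySem.Dict.size_empty]
  have hcnt : ∀ k, ((originals.foldl pvStepP1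
        ([], PySem.Set.ofList [], PySem.Dict.empty)).1.foldl
        (fun d c => d.insert c (0 : Int)) PySem.Dict.empty).getD k 0
      = (PySem.Dict.empty : PySem.Dict String Int).getD k 0 := by
    intro k
    rw [pvCnt0_getD _ PySem.Dict.empty (fun j => PySem.Dict.getD_empty j 0) k,
      PySem.Dict.getD_empty]
  obtain ⟨h1, h2, h3⟩ := pvMain originals ([], PySem.Set.ofList [], PySem.Dict.empty)
    _ PySem.Dict.empty PySem.Dict.empty [] hinv hcnt
  simp only [build_short_names, build_short_names_alt]
  rw [h1, h2, h3]
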